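-- pv_equiv track=rewrite | github.com/miliar/Code_Jam_Webscraper | solutions_python/Problem_168/201.py | boundary_count
-- ===== SOURCE A (Python) =====
-- def boundary_count(grid):
--     import copy
--     new_grid = copy.deepcopy(grid)
--
--     if len(grid[0]) > 1:
--         for i in range(len(grid)):
--             if grid[i][0] == '<':
--                 new_grid[i][0] = '>'
--             if grid[i][-1] == '>':
--                 new_grid[i][-1] = '<'
--
--     if len(grid) > 1:
--         for i in range(len(grid[0])):
--             if grid[0][i] == '^':
--                 new_grid[0][i] = 'v'
--             if grid[-1][i] == 'v':
--                 new_grid[-1][i] = '^'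
--
--     cnt = 0
--     for i in range(len(grid)):
--         for j in range(len(grid[0])):
--             if grid[i][j] != new_grid[i][j]:
--                 cnt = cnt + 1
--
--     return new_grid, cnt
-- ===== SOURCE B (Python) =====
-- def boundary_count(grid):
--     h, w = len(grid), len(grid[0])
--     new_grid = []
--     cnt = 0
--     for row in grid:
--         new_row = list(row)
--         if w > 1:
--             if row[0] == '<':
--                 new_row[0] = '>'
--                 cnt += 1
--             if row[-1] == '>':
--                 new_row[-1] = '<'
--                 cnt += 1
--         new_grid.append(new_row)
--     if h > 1:
--         for j in range(w):
--             if grid[0][j] == '^':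
--                 new_grid[0][j] = 'v'
--                 cnt += 1
--             if grid[-1][j] == 'v':
--                 new_grid[-1][j] = '^'
--                 cnt += 1
--     return new_grid, cnt
-- ===== Notes on version B (the rewrite author's own statement) =====
-- stated objective: simpler
-- what changed: Instead of deepcopying the grid, editing boundary cells in place and then rescanning the whole grid to count differences, B builds the new grid row by row in a single pass over the rows (flipping the horizontal arrows as each new row is made), then applies the vertical flips to the first and last rows, tallying every flip inline, so the final full-grid comparison pass disappears; Pre_ excludes the inputs where A raises IndexError (empty grid, or a row shorter than the first row).
-- intended difference: On ragged grids whose first row has more than one column and where some strictly longer row ends in '>', A flips that trailing arrow but its final rescan only covers the first row's width and so undercounts the changes, while B counts every flip it performs, which is the intended tally. — e.g. on boundary_count([["a", "b"], ["<", "x", ">"]]): A returns ([["a", "b"], [">", "x", "<"]], 1), B returns ([["a", "b"], [">", "x", "<"]], 2)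
import Mathlib
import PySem

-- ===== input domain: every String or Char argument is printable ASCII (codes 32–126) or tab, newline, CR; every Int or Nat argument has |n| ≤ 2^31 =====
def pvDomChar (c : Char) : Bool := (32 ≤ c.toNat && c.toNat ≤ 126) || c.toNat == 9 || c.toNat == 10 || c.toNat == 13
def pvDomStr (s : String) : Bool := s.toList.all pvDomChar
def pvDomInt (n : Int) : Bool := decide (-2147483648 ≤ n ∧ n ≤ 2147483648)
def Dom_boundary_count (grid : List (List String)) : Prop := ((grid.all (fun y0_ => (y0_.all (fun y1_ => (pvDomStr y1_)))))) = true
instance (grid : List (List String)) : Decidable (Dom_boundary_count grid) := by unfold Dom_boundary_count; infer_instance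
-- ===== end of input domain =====

-- B builds the new grid row by row in one pass (flipping horizontal boundary arrows as each
-- row is produced), then applies the vertical flips to the first and last rows, tallying every
-- flip inline; A's final full-grid rescan disappears (simpler decomposition). Return-value
-- equivalence only: A mutates a fresh deepcopy, never its argument.

-- ===== PORT A =====
-- Python's r[i] / r[-1] reads and writes are ported with getD / set at the corresponding
-- nonnegative index; exact whenever the index is in range, which Pre_boundary_count
-- guarantees (Python raises IndexError otherwise).
def bcStep1 (grid ng : List (List String)) (i : Nat) : List (List String) :=
  let ng' := if (grid.getD i []).getD 0 "" == "<"
             then ng.set i ((ng.getD i []).set 0 ">") else ng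
  if (grid.getD i []).getD ((grid.getD i []).length - 1) "" == ">"
  then ng'.set i ((ng'.getD i []).set ((grid.getD i []).length - 1) "<") else ng'

def bcStep2 (grid ng : List (List String)) (i : Nat) : List (List String) :=
  let ng' := if (grid.getD 0 []).getD i "" == "^"
             then ng.set 0 ((ng.getD 0 []).set i "v") else ng
  if (grid.getD (grid.length - 1) []).getD i "" == "v"
  then ng'.set (grid.length - 1) ((ng'.getD (grid.length - 1) []).set i "^") else ng'

def bcNg1 (grid : List (List String)) : List (List String) :=
  if 1 < (grid.getD 0 []).length then (List.range grid.length).foldl (bcStep1 grid) grid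
  else grid

def bcNg2 (grid : List (List String)) : List (List String) :=
  if 1 < grid.length then
    (List.range (grid.getD 0 []).length).foldl (bcStep2 grid) (bcNg1 grid)
  else bcNg1 grid

def bcCnt (grid : List (List String)) : Int :=
  (List.range grid.length).foldl (fun c i =>
    (List.range (grid.getD 0 []).length).foldl (fun c j =>
      if (grid.getD i []).getD j "" != ((bcNg2 grid).getD i []).getD j "" then c + 1 else c) c) 0

def boundary_count (grid : List (List String)) : List (List String) × Int :=
  (bcNg2 grid, bcCnt grid)

-- ===== PORT B =====
-- one pass over the rows: the produced row (with its horizontal flips) is appended, the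
-- flip count is carried in the accumulator
def altRowStep (w : Nat) (st : List (List String) × Int) (row : List String) :
    List (List String) × Int :=
  if 1 < w then
    let p1 := if row.getD 0 "" == "<" then (row.set 0 ">", st.2 + 1) else (row, st.2)
    let p2 := if row.getD (row.length - 1) "" == ">"
              then (p1.1.set (row.length - 1) "<", p1.2 + 1) else p1
    (st.1 ++ [p2.1], p2.2)
  else (st.1 ++ [row], st.2)

-- vertical flips on the first and last produced rows, still tallying inline
def altStep2 (grid : List (List String)) (st : List (List String) × Int) (j : Nat) :
    List (List String) × Int :=
  let p1 := if (grid.getD 0 []).getD j "" == "^"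
            then (st.1.set 0 ((st.1.getD 0 []).set j "v"), st.2 + 1) else st
  if (grid.getD (grid.length - 1) []).getD j "" == "v"
  then (p1.1.set (grid.length - 1) ((p1.1.getD (grid.length - 1) []).set j "^"), p1.2 + 1)
  else p1

def boundary_count_alt (grid : List (List String)) : List (List String) × Int :=
  let st := grid.foldl (altRowStep (grid.getD 0 []).length) ([], 0)
  if 1 < grid.length then
    (List.range (grid.getD 0 []).length).foldl (altStep2 grid) st
  else st

-- ===== PRECONDITION & SPEC =====
-- Pre_ is exactly A's return domain: A raises IndexError on the empty grid and on any grid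
-- having a row shorter than its first row.
def Pre_boundary_count (grid : List (List String)) : Prop :=
  grid ≠ [] ∧ ∀ row ∈ grid, (grid.getD 0 []).length ≤ row.length
instance (grid : List (List String)) : Decidable (Pre_boundary_count grid) := by
  unfold Pre_boundary_count; infer_instance
def pvWitness_boundary_count : List (List String) := [["<", "^"], ["v", ">"]]

-- On ragged grids whose first row has more than one column and where some strictly longer row
-- ends in ">", A flips that trailing arrow but its final rescan only covers the first row's
-- width, so it undercounts the changes; B counts every flip it performs, the intended tally.
def D_boundary_count (grid : List (List String)) : Prop :=
  1 < (grid.getD 0 []).length ∧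
    ∃ row ∈ grid, (grid.getD 0 []).length < row.length ∧ row.getLast? = some ">"
instance (grid : List (List String)) : Decidable (D_boundary_count grid) := by
  unfold D_boundary_count; infer_instance

def Spec_boundary_count (grid : List (List String)) (out : List (List String) × Int) : Prop :=
  ¬ D_boundary_count grid → out = boundary_count_alt grid
instance (grid : List (List String)) (out : List (List String) × Int) :
    Decidable (Spec_boundary_count grid out) := by unfold Spec_boundary_count; infer_instance

def pvDiffWitness_boundary_count : List (List String) := [["a", "b"], ["<", "x", ">"]]
def pvDiffWitnessOut_boundary_count :
    (List (List String) × Int) × (List (List String) × Int) :=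
  (([["a", "b"], [">", "x", "<"]], 1), ([["a", "b"], [">", "x", "<"]], 2))

-- ===== CLAIM (what is proved, stated in full; the proofs are below) =====
def Claim_unchanged_boundary_count : Prop := ∀ (grid : List (List String)),
  Dom_boundary_count grid → Pre_boundary_count grid →
    Spec_boundary_count grid (boundary_count grid)
def Claim_changed_boundary_count : Prop :=
  Dom_boundary_count (pvDiffWitness_boundary_count) ∧
  Pre_boundary_count (pvDiffWitness_boundary_count) ∧
  D_boundary_count (pvDiffWitness_boundary_count) ∧
  boundary_count (pvDiffWitness_boundary_count) = pvDiffWitnessOut_boundary_count.1 ∧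
  boundary_count_alt (pvDiffWitness_boundary_count) = pvDiffWitnessOut_boundary_count.2 ∧
  pvDiffWitnessOut_boundary_count.1 ≠ pvDiffWitnessOut_boundary_count.2
def Claim_exact_boundary_count : Prop := ∀ (grid : List (List String)),
  Dom_boundary_count grid → Pre_boundary_count grid → D_boundary_count grid →
    boundary_count grid ≠ boundary_count_alt grid

-- ===== LEMMAS AND PROOFS =====

-- proof-side canonical description of both programs: the pointwise new grid and the flip counts
def bcNewCell (h w i j last : Nat) (c : String) : String :=
  if 1 < w ∧ j = 0 ∧ c = "<" then ">"
  else if 1 < w ∧ j = last ∧ c = ">" then "<"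
  else if 1 < h ∧ j < w ∧ i = 0 ∧ c = "^" then "v"
  else if 1 < h ∧ j < w ∧ i = h - 1 ∧ c = "v" then "^"
  else c

def bcAltGrid (grid : List (List String)) : List (List String) :=
  grid.mapIdx (fun i row =>
    row.mapIdx (fun j c => bcNewCell grid.length (grid.getD 0 []).length i j (row.length - 1) c))

def bcAltCnt (grid : List (List String)) : Int :=
  (grid.zip (bcAltGrid grid)).foldl (fun c rn =>
    (rn.1.zip rn.2).foldl (fun c p => if p.1 ≠ p.2 then c + 1 else c) c) 0

def hind (w : Nat) (r : List String) : Int :=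
  if 1 < w then
    (if r.getD 0 "" = "<" then 1 else 0) + (if r.getD (r.length - 1) "" = ">" then 1 else 0)
  else 0

def vind (grid : List (List String)) (j : Nat) : Int :=
  (if (grid.getD 0 []).getD j "" = "^" then 1 else 0)
  + (if (grid.getD (grid.length - 1) []).getD j "" = "v" then 1 else 0)

def bcC (grid : List (List String)) : Int :=
  (grid.map (hind (grid.getD 0 []).length)).sum
  + (if 1 < grid.length then
      ((List.range (grid.getD 0 []).length).map (vind grid)).sum else 0)

def aRow (r : List String) : List String :=
  let r1 := if r.getD 0 "" == "<" then r.set 0 ">" else r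
  if r.getD (r.length - 1) "" == ">" then r1.set (r.length - 1) "<" else r1

theorem set_getD_self (l : List (List String)) (i : Nat) (h : i < l.length) :
    l.set i (l.getD i []) = l := by
  apply List.ext_getElem? ; intro j
  simp [List.getElem?_set, List.getD_eq_getElem?_getD]
  intro hj; subst hj; simp [h]

theorem getD_set_self (l : List (List String)) (i : Nat) (h : i < l.length) (v : List String) :
    (l.set i v).getD i [] = v := by
  simp [List.getD_eq_getElem?_getD, List.getElem?_set_self, h]

theorem bcStep1_eq (grid ng : List (List String)) (i : Nat) (hi : i < ng.length)
    (hrow : ng.getD i [] = grid.getD i []) :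
    bcStep1 grid ng i = ng.set i (aRow (grid.getD i [])) := by
  unfold bcStep1 aRow
  by_cases h1 : (grid.getD i []).getD 0 "" == "<" <;>
    by_cases h2 : (grid.getD i []).getD ((grid.getD i []).length - 1) "" == ">" <;>
    simp only [h1, h2, if_true, if_false, Bool.false_eq_true, hrow,
      getD_set_self _ _ hi, List.set_set]
  · exact (set_getD_self ng i hi).symm.trans (by rw [hrow])

theorem phase1_foldl (grid : List (List String)) (n : Nat) (hn : n ≤ grid.length) :
    (List.range n).foldl (bcStep1 grid) grid
      = grid.mapIdx (fun i r => if i < n then aRow r else r) := by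
  induction n with
  | zero =>
      apply List.ext_getElem? ; intro j
      simp [List.getElem?_mapIdx]
  | succ n ih =>
      have hn' : n ≤ grid.length := Nat.le_of_succ_le hn
      rw [List.range_succ, List.foldl_append, ih hn']
      have hi : n < (grid.mapIdx (fun i r => if i < n then aRow r else r)).length := by
        simp; omega
      have hg : grid[n]? = some (grid[n]'(by omega)) := List.getElem?_eq_getElem (by omega)
      have hrow : (grid.mapIdx (fun i r => if i < n then aRow r else r)).getD n []
          = grid.getD n [] := by
        simp [List.getD_eq_getElem?_getD, List.getElem?_mapIdx, hg]
      rw [List.foldl_cons, List.foldl_nil, bcStep1_eq _ _ _ hi hrow]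
      apply List.ext_getElem? ; intro j
      by_cases hj : j = n
      · subst hj
        simp [List.getElem?_set_self hi, List.getElem?_mapIdx, List.getD_eq_getElem?_getD, hg]
      · have h1 : j < n → j < n + 1 := by omega
        have h2 : ¬ j = n → (j < n + 1 ↔ j < n) := by omega
        simp [List.getElem?_set_ne (by omega : ¬ n = j), List.getElem?_mapIdx]
        cases hgj : grid[j]? with
        | none => simp
        | some r =>
            simp
            by_cases hjn : j < n
            · simp [hjn]; intro h; exact absurd h (by omega)
            · simp [hjn]; intro h; exact absurd h (by omega)

def vRow (s : String) (orig : List String) (tgt : String) (n : Nat) (r : List String) : List String :=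
  r.mapIdx (fun j c => if j < n ∧ orig.getD j "" == s then tgt else c)

theorem vRow_zero (s : String) (orig : List String) (tgt : String) (r : List String) :
    vRow s orig tgt 0 r = r := by
  apply List.ext_getElem? ; intro j
  simp [vRow, List.getElem?_mapIdx]

theorem vRow_length (s : String) (orig : List String) (tgt : String) (n : Nat) (r : List String) :
    (vRow s orig tgt n r).length = r.length := by simp [vRow]

theorem if_le_of_ne {α : Type} (j n : Nat) (hj : ¬ j = n) (P : Prop) [Decidable P] (a b : α) :
    (if j < n ∧ P then a else b) = if j ≤ n ∧ P then a else b := by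
  by_cases h1 : j < n ∧ P
  · rw [if_pos h1, if_pos ⟨by omega, h1.2⟩]
  · rw [if_neg h1, if_neg ?_]
    rintro ⟨hle, hp⟩
    exact h1 ⟨by omega, hp⟩

theorem vRow_succ (s : String) (orig : List String) (tgt : String) (n : Nat) (r : List String)
    (hn : n < r.length) :
    (if orig.getD n "" == s then (vRow s orig tgt n r).set n tgt else vRow s orig tgt n r)
      = vRow s orig tgt (n + 1) r := by
  apply List.ext_getElem? ; intro j
  by_cases hc : orig.getD n "" == s
  · simp only [hc, if_true]
    by_cases hj : j = n
    · subst hj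
      have hlt : j < (vRow s orig tgt j r).length := by rw [vRow_length]; exact hn
      rw [List.getElem?_set_self hlt]
      have hc' : orig[j]?.getD "" = s := by
        simpa [List.getD_eq_getElem?_getD] using hc
      simp [vRow, List.getElem?_mapIdx, List.getElem?_eq_getElem hn, hc']
    · rw [List.getElem?_set_ne (by omega : ¬ n = j)]
      simp [vRow, List.getElem?_mapIdx]
      cases r[j]? <;> simp
      exact if_le_of_ne j n hj _ _ _
  · simp only [hc, if_false, Bool.false_eq_true]
    by_cases hj : j = n
    · subst hj
      have hc' : ¬ orig[j]?.getD "" = s := by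
        simpa [List.getD_eq_getElem?_getD] using hc
      simp [vRow, List.getElem?_mapIdx, List.getElem?_eq_getElem hn, hc']
    · simp [vRow, List.getElem?_mapIdx]
      cases r[j]? <;> simp
      exact if_le_of_ne j n hj _ _ _

theorem getD_set_ne (l : List (List String)) (a b : Nat) (h : ¬ a = b) (v : List String) :
    (l.set a v).getD b [] = l.getD b [] := by
  simp [List.getD_eq_getElem?_getD, List.getElem?_set_ne h]

theorem bcStep2_eq (grid ng : List (List String)) (hh : 1 < grid.length)
    (hlen : ng.length = grid.length) (i : Nat) :
    bcStep2 grid ng i =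
      (ng.set 0 (if (grid.getD 0 []).getD i "" == "^"
                 then (ng.getD 0 []).set i "v" else ng.getD 0 [])).set (grid.length - 1)
        (if (grid.getD (grid.length - 1) []).getD i "" == "v"
         then (ng.getD (grid.length - 1) []).set i "^" else ng.getD (grid.length - 1) []) := by
  have hne : ¬ (0 : Nat) = grid.length - 1 := by omega
  have h0 : 0 < ng.length := by omega
  have hl : grid.length - 1 < ng.length := by omega
  unfold bcStep2
  by_cases c1 : (grid.getD 0 []).getD i "" == "^" <;>
    by_cases c2 : (grid.getD (grid.length - 1) []).getD i "" == "v" <;>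
    simp only [c1, c2, if_true, if_false, Bool.false_eq_true]
  · rw [getD_set_ne _ _ _ hne]
  · rw [show ng.getD (grid.length - 1) []
        = (ng.set 0 ((ng.getD 0 []).set i "v")).getD (grid.length - 1) [] from
        (getD_set_ne _ _ _ hne _).symm]
    rw [set_getD_self _ _ (by simpa using hl)]
  · rw [set_getD_self _ _ h0]
  · rw [set_getD_self _ _ h0, set_getD_self _ _ hl]

theorem phase2_foldl (grid ng1 : List (List String)) (hh : 1 < grid.length)
    (hlen : ng1.length = grid.length)
    (n : Nat) (h0 : n ≤ (ng1.getD 0 []).length)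
    (hb : n ≤ (ng1.getD (grid.length - 1) []).length) :
    (List.range n).foldl (bcStep2 grid) ng1
      = (ng1.set 0 (vRow "^" (grid.getD 0 []) "v" n (ng1.getD 0 []))).set (grid.length - 1)
          (vRow "v" (grid.getD (grid.length - 1) []) "^" n (ng1.getD (grid.length - 1) [])) := by
  have h0lt : 0 < ng1.length := by omega
  have hllt : grid.length - 1 < ng1.length := by omega
  have hne : ¬ (0 : Nat) = grid.length - 1 := by omega
  induction n with
  | zero =>
      rw [vRow_zero, vRow_zero, set_getD_self _ _ h0lt, set_getD_self _ _ hllt]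
      simp
  | succ n ih =>
      have h0' : n ≤ (ng1.getD 0 []).length := by omega
      have hb' : n ≤ (ng1.getD (grid.length - 1) []).length := by omega
      rw [List.range_succ, List.foldl_append, ih h0' hb', List.foldl_cons, List.foldl_nil]
      have hMlen : (((ng1.set 0 (vRow "^" (grid.getD 0 []) "v" n (ng1.getD 0 []))).set
          (grid.length - 1)
          (vRow "v" (grid.getD (grid.length - 1) []) "^" n
            (ng1.getD (grid.length - 1) [])))).length = grid.length := by
        simp [hlen]
      rw [bcStep2_eq grid _ hh hMlen n]
      rw [getD_set_ne _ _ _ (by omega : ¬ grid.length - 1 = 0),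
        getD_set_self _ _ (by simpa using h0lt),
        getD_set_self _ _ (by simpa using hllt)]
      rw [vRow_succ _ _ _ _ _ (by omega),
        vRow_succ _ _ _ _ _ (by omega)]
      rw [List.set_comm _ _ (by omega : grid.length - 1 ≠ 0), List.set_set, List.set_set]

theorem aRow_length (r : List String) : (aRow r).length = r.length := by
  unfold aRow; split_ifs <;> simp

theorem aRow_getElem? (r : List String) (hr : 2 ≤ r.length) (j : Nat) (hj : j < r.length) :
    (aRow r)[j]? = some (
      if j = 0 then (if r.getD j "" = "<" then ">" else r.getD j "")
      else if j = r.length - 1 then (if r.getD j "" = ">" then "<" else r.getD j "")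
      else r.getD j "") := by
  have hgd : r.getD j "" = r[j]'hj := by
    simp [List.getD_eq_getElem?_getD, List.getElem?_eq_getElem hj]
  have hg0 : r.getD 0 "" = r[0]'(by omega) := by
    simp [List.getD_eq_getElem?_getD, List.getElem?_eq_getElem (by omega : 0 < r.length)]
  have hgl : r.getD (r.length - 1) "" = r[r.length - 1]'(by omega) := by
    simp [List.getD_eq_getElem?_getD, List.getElem?_eq_getElem (by omega : r.length - 1 < r.length)]
  unfold aRow
  simp only [beq_iff_eq, hg0, hgl]
  by_cases hj0 : j = 0 <;> by_cases hjl : j = r.length - 1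
  · omega
  · subst hj0
    split_ifs with c1 c2 c2 <;>
      simp_all [List.getElem?_set, List.getElem?_eq_getElem hj, hj, hgd, List.getElem_set,
        show ¬ r.length - 1 = 0 by omega]
  · subst hjl
    split_ifs with c1 c2 c2 <;>
      simp_all [List.getElem?_set, List.getElem?_eq_getElem hj, hj, hgd, List.getElem_set,
        show ¬ (0 : Nat) = r.length - 1 by omega]
  · split_ifs with c1 c2 c2 <;>
      simp_all [List.getElem?_set, List.getElem?_eq_getElem hj, hj, hgd, List.getElem_set,
        show ¬ (0 : Nat) = j by omega, show ¬ r.length - 1 = j by omega]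

-- L1 : no pass touches the row

theorem rowL1 (h w i : Nat) (r : List String)
    (hw : ¬ 1 < w) (hi : ¬ 1 < h ∨ (¬ i = 0 ∧ ¬ i = h - 1)) :
    r.mapIdx (fun j c => bcNewCell h w i j (r.length - 1) c) = r := by
  apply List.ext_getElem? ; intro j
  simp only [List.getElem?_mapIdx]
  cases r[j]? with
  | none => rfl
  | some c =>
      rcases hi with hh | ⟨hi0, hil⟩
      · simp [bcNewCell, hw, hh]
      · simp [bcNewCell, hw, hi0, hil]

theorem bcNewCell_mid (h w i j last : Nat) (c : String)
    (hi : ¬ 1 < h ∨ (¬ i = 0 ∧ ¬ i = h - 1)) :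
    bcNewCell h w i j last c =
      if 1 < w ∧ j = 0 ∧ c = "<" then ">"
      else if 1 < w ∧ j = last ∧ c = ">" then "<" else c := by
  unfold bcNewCell
  rcases hi with hh | ⟨hi0, hil⟩
  · simp [hh]
  · simp [hi0, hil]

theorem rowL2 (h w i : Nat) (r : List String) (hw : 1 < w) (hwr : w ≤ r.length)
    (hi : ¬ 1 < h ∨ (¬ i = 0 ∧ ¬ i = h - 1)) :
    aRow r = r.mapIdx (fun j c => bcNewCell h w i j (r.length - 1) c) := by
  have hr : 2 ≤ r.length := by omega
  apply List.ext_getElem? ; intro j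
  by_cases hj : j < r.length
  · have hval : r[j]? = some (r.getD j "") := by
      simp [List.getD_eq_getElem?_getD, List.getElem?_eq_getElem hj]
    rw [aRow_getElem? r hr j hj, List.getElem?_mapIdx, hval]
    simp only [Option.map_some, Option.some.injEq]
    rw [bcNewCell_mid h w i j (r.length - 1) _ hi]
    by_cases hj0 : j = 0
    · subst hj0
      by_cases hc : r.getD 0 "" = "<" <;>
        simp [hw, hc, show ¬ (0 : Nat) = r.length - 1 by omega]
    · by_cases hjl : j = r.length - 1
      · simp [hjl, hw, show ¬ r.length - 1 = 0 by omega]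
      · simp [hj0, hjl]
  · have h1 : (aRow r)[j]? = none := by
      rw [List.getElem?_eq_none_iff]; rw [aRow_length]; omega
    have h2 : r[j]? = none := by rw [List.getElem?_eq_none_iff]; omega
    rw [h1, List.getElem?_mapIdx, h2]; rfl

theorem getElem?_some_lt {α : Type} (l : List α) (j : Nat) (c : α) (hg : l[j]? = some c) :
    j < l.length := by
  by_contra hcon
  rw [List.getElem?_eq_none_iff.mpr (by omega)] at hg
  cases hg

theorem rowL3 (h : Nat) (g0 : List String) (hw : ¬ 1 < g0.length) (hh : 1 < h) :
    vRow "^" g0 "v" g0.length g0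
      = g0.mapIdx (fun j c => bcNewCell h g0.length 0 j (g0.length - 1) c) := by
  apply List.ext_getElem? ; intro j
  simp only [vRow, List.getElem?_mapIdx]
  cases hg : g0[j]? with
  | none => rfl
  | some c =>
      have hj : j < g0.length := getElem?_some_lt _ _ _ hg
      have hgd : g0.getD j "" = c := by simp [List.getD_eq_getElem?_getD, hg]
      have hge : g0[j]'hj = c := by simpa [List.getElem?_eq_getElem hj] using hg
      simp only [Option.map_some, Option.some.injEq]
      unfold bcNewCell
      by_cases hc : c = "^" <;>
        simp [hw, hh, hj, hgd, hge, hc, show ¬ (0 : Nat) = h - 1 by omega]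

theorem rowL4 (h : Nat) (g0 : List String) (hw : 1 < g0.length) (hh : 1 < h) :
    vRow "^" g0 "v" g0.length (aRow g0)
      = g0.mapIdx (fun j c => bcNewCell h g0.length 0 j (g0.length - 1) c) := by
  apply List.ext_getElem? ; intro j
  by_cases hj : j < g0.length
  · have hg : g0[j]? = some (g0.getD j "") := by
      simp [List.getD_eq_getElem?_getD, List.getElem?_eq_getElem hj]
    simp only [vRow, List.getElem?_mapIdx, aRow_getElem? g0 (by omega) j hj, hg,
      Option.map_some, Option.some.injEq]
    unfold bcNewCell
    by_cases hj0 : j = 0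
    · subst hj0
      by_cases hc1 : g0.getD 0 "" = "^" <;> by_cases hc2 : g0.getD 0 "" = "<" <;>
        simp_all [hw, hh, hj, show ¬ (0 : Nat) = g0.length - 1 by omega,
          show ¬ (0 : Nat) = h - 1 by omega]
    · by_cases hjl : j = g0.length - 1
      · by_cases hc1 : g0.getD j "" = "^" <;> by_cases hc2 : g0.getD j "" = ">" <;>
        simp_all [hw, hh, hj, hj0, hjl, show ¬ g0.length - 1 = 0 by omega,
          show ¬ (0 : Nat) = h - 1 by omega]
      · by_cases hc1 : g0.getD j "" = "^" <;>
        simp_all [hw, hh, hj, hj0, hjl, show ¬ (0 : Nat) = h - 1 by omega]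
  · have h1 : j ≥ (aRow g0).length := by rw [aRow_length]; omega
    rw [List.getElem?_eq_none_iff.mpr (by simp [vRow]; omega),
      List.getElem?_mapIdx, List.getElem?_eq_none_iff.mpr (by omega)]
    rfl

theorem rowL5 (h w : Nat) (r : List String) (hw : ¬ 1 < w) (hh : 1 < h) (hwr : w ≤ r.length) :
    vRow "v" r "^" w r = r.mapIdx (fun j c => bcNewCell h w (h - 1) j (r.length - 1) c) := by
  apply List.ext_getElem? ; intro j
  simp only [vRow, List.getElem?_mapIdx]
  cases hg : r[j]? with
  | none => rfl
  | some c =>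
      have hj : j < r.length := getElem?_some_lt _ _ _ hg
      have hgd : r.getD j "" = c := by simp [List.getD_eq_getElem?_getD, hg]
      have hge : r[j]'hj = c := by simpa [List.getElem?_eq_getElem hj] using hg
      simp only [Option.map_some, Option.some.injEq]
      unfold bcNewCell
      by_cases hc : c = "v" <;> by_cases hjw : j < w <;>
        simp_all [hge, hh, hgd, show ¬ h - 1 = 0 by omega, show ¬ 1 < w from hw]

theorem rowL6 (h w : Nat) (r : List String) (hw : 1 < w) (hh : 1 < h) (hwr : w ≤ r.length) :
    vRow "v" r "^" w (aRow r) = r.mapIdx (fun j c => bcNewCell h w (h - 1) j (r.length - 1) c) := by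
  apply List.ext_getElem? ; intro j
  by_cases hj : j < r.length
  · have hg : r[j]? = some (r.getD j "") := by
      simp [List.getD_eq_getElem?_getD, List.getElem?_eq_getElem hj]
    simp only [vRow, List.getElem?_mapIdx, aRow_getElem? r (by omega) j hj, hg,
      Option.map_some, Option.some.injEq]
    unfold bcNewCell
    by_cases hj0 : j = 0
    · subst hj0
      by_cases hc1 : r.getD 0 "" = "v" <;> by_cases hc2 : r.getD 0 "" = "<" <;>
        simp_all [hw, hh, show (0 : Nat) < w by omega, show ¬ (0 : Nat) = r.length - 1 by omega,
          show ¬ h - 1 = 0 by omega]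
    · by_cases hjl : j = r.length - 1
      · by_cases hjw : j < w <;>
          by_cases hc1 : r.getD j "" = "v" <;> by_cases hc2 : r.getD j "" = ">" <;>
          simp_all [hw, hh, hj0, hjl, show ¬ r.length - 1 = 0 by omega,
            show ¬ h - 1 = 0 by omega]
      · by_cases hjw : j < w <;> by_cases hc1 : r.getD j "" = "v" <;>
          simp_all [hw, hh, hj0, hjl, show ¬ h - 1 = 0 by omega]
  · have h1 : j ≥ (aRow r).length := by rw [aRow_length]; omega
    rw [List.getElem?_eq_none_iff.mpr (by simp [vRow]; omega),
      List.getElem?_mapIdx, List.getElem?_eq_none_iff.mpr (by omega)]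
    rfl

theorem ng2_eq (grid : List (List String)) (hne : grid ≠ [])
    (hrows : ∀ row ∈ grid, (grid.getD 0 []).length ≤ row.length) :
    bcNg2 grid = bcAltGrid grid := by
  have h0 : 0 < grid.length := by
    cases grid with
    | nil => exact absurd rfl hne
    | cons a t => simp
  have hgrid0 : grid[0]? = some (grid.getD 0 []) := by
    simp [List.getD_eq_getElem?_getD, List.getElem?_eq_getElem h0]
  unfold bcNg2 bcNg1 bcAltGrid
  by_cases hw : 1 < (grid.getD 0 []).length <;> by_cases hh : 1 < grid.length <;>
    simp only [hw, hh, if_true, if_false]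
  · -- both passes
    rw [phase1_foldl grid grid.length le_rfl]
    have hM0 : (grid.mapIdx (fun i r => if i < grid.length then aRow r else r)).getD 0 []
        = aRow (grid.getD 0 []) := by
      simp [List.getD_eq_getElem?_getD, List.getElem?_mapIdx, hgrid0, h0]
    have hgridl : grid[grid.length - 1]? = some (grid.getD (grid.length - 1) []) := by
      simp [List.getD_eq_getElem?_getD, List.getElem?_eq_getElem (by omega : grid.length - 1 < grid.length)]
    have hMl : (grid.mapIdx (fun i r => if i < grid.length then aRow r else r)).getD
          (grid.length - 1) [] = aRow (grid.getD (grid.length - 1) []) := by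
      simp [List.getD_eq_getElem?_getD, List.getElem?_mapIdx, hgridl,
        show grid.length - 1 < grid.length by omega]
    have hmeml : grid.getD (grid.length - 1) [] ∈ grid :=
      List.mem_of_getElem? hgridl
    rw [phase2_foldl grid _ hh (by simp) _
      (by rw [hM0, aRow_length])
      (by rw [hMl, aRow_length]; exact hrows _ hmeml)]
    rw [hM0, hMl]
    apply List.ext_getElem? ; intro i
    by_cases hil : i = grid.length - 1
    · subst hil
      rw [List.getElem?_set_self (by simp; omega), List.getElem?_mapIdx, hgridl]
      simp only [Option.map_some, Option.some.injEq]
      exact rowL6 grid.length (grid.getD 0 []).length (grid.getD (grid.length - 1) [])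
        hw hh (hrows _ hmeml)
    · rw [List.getElem?_set_ne (by omega : grid.length - 1 ≠ i)]
      by_cases hi0 : i = 0
      · subst hi0
        rw [List.getElem?_set_self (by simp; omega), List.getElem?_mapIdx, hgrid0]
        simp only [Option.map_some, Option.some.injEq]
        exact rowL4 grid.length (grid.getD 0 []) hw hh
      · rw [List.getElem?_set_ne (by omega : (0 : Nat) ≠ i), List.getElem?_mapIdx,
          List.getElem?_mapIdx]
        cases hg : grid[i]? with
        | none => rfl
        | some r =>
            have hi : i < grid.length := getElem?_some_lt _ _ _ hg
            simp only [Option.map_some, Option.some.injEq, if_pos hi]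
            exact rowL2 grid.length (grid.getD 0 []).length i r hw
              (hrows _ (List.mem_of_getElem? hg)) (Or.inr ⟨hi0, hil⟩)
  · -- only horizontal pass (h = 1)
    rw [phase1_foldl grid grid.length le_rfl]
    apply List.ext_getElem? ; intro i
    rw [List.getElem?_mapIdx, List.getElem?_mapIdx]
    cases hg : grid[i]? with
    | none => rfl
    | some r =>
        have hi : i < grid.length := getElem?_some_lt _ _ _ hg
        simp only [Option.map_some, Option.some.injEq, if_pos hi]
        exact rowL2 grid.length (grid.getD 0 []).length i r hw
          (hrows _ (List.mem_of_getElem? hg)) (Or.inl hh)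
  · -- only vertical pass
    have hgridl : grid[grid.length - 1]? = some (grid.getD (grid.length - 1) []) := by
      simp [List.getD_eq_getElem?_getD, List.getElem?_eq_getElem (by omega : grid.length - 1 < grid.length)]
    have hmeml : grid.getD (grid.length - 1) [] ∈ grid := List.mem_of_getElem? hgridl
    rw [phase2_foldl grid grid hh rfl _ le_rfl (hrows _ hmeml)]
    apply List.ext_getElem? ; intro i
    by_cases hil : i = grid.length - 1
    · subst hil
      rw [List.getElem?_set_self (by simp; omega), List.getElem?_mapIdx, hgridl]
      simp only [Option.map_some, Option.some.injEq]
      exact rowL5 grid.length (grid.getD 0 []).length (grid.getD (grid.length - 1) [])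
        hw hh (hrows _ hmeml)
    · rw [List.getElem?_set_ne (by omega : grid.length - 1 ≠ i)]
      by_cases hi0 : i = 0
      · subst hi0
        rw [List.getElem?_set_self h0, List.getElem?_mapIdx, hgrid0]
        simp only [Option.map_some, Option.some.injEq]
        exact rowL3 grid.length (grid.getD 0 []) hw hh
      · rw [List.getElem?_set_ne (by omega : (0 : Nat) ≠ i), List.getElem?_mapIdx]
        cases hg : grid[i]? with
        | none => rfl
        | some r =>
            simp only [Option.map_some, Option.some.injEq]
            exact (rowL1 grid.length (grid.getD 0 []).length i r hw (Or.inr ⟨hi0, hil⟩)).symm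
  · -- no pass
    apply List.ext_getElem? ; intro i
    rw [List.getElem?_mapIdx]
    cases hg : grid[i]? with
    | none => rfl
    | some r =>
        simp only [Option.map_some, Option.some.injEq]
        exact (rowL1 grid.length (grid.getD 0 []).length i r hw (Or.inl hh)).symm

theorem mapIdx_getD (f : Nat → String → String) (r : List String) (j : Nat) (hj : j < r.length) :
    (r.mapIdx f).getD j "" = f j (r.getD j "") := by
  simp [List.getD_eq_getElem?_getD, List.getElem?_mapIdx, List.getElem?_eq_getElem hj]

theorem bcNewCell_tail (h w i j : Nat) (r : List String) (hj : w ≤ j) (hjl : j < r.length)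
    (hnd : ¬ (1 < w ∧ j = r.length - 1 ∧ r.getD j "" = ">")) :
    bcNewCell h w i j (r.length - 1) (r.getD j "") = r.getD j "" := by
  unfold bcNewCell
  have hb1 : ¬ (1 < w ∧ j = 0 ∧ r.getD j "" = "<") := by rintro ⟨hw1, hj0, -⟩; omega
  have hb3 : ¬ (1 < h ∧ j < w ∧ i = 0 ∧ r.getD j "" = "^") := by rintro ⟨-, hjw, -, -⟩; omega
  have hb4 : ¬ (1 < h ∧ j < w ∧ i = h - 1 ∧ r.getD j "" = "v") := by
    rintro ⟨-, hjw, -, -⟩; omega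
  rw [if_neg hb1, if_neg hnd, if_neg hb3, if_neg hb4]

theorem countP_zip_eq (r nr : List String) (hlen : nr.length = r.length) :
    (r.zip nr).countP (fun p => !(p.1 == p.2))
      = (List.range r.length).countP (fun j => !(r.getD j "" == nr.getD j "")) := by
  induction r generalizing nr with
  | nil => cases nr <;> simp_all
  | cons a t ih =>
      cases nr with
      | nil => simp at hlen
      | cons b u =>
          have hlen' : u.length = t.length := by simpa using hlen
          rw [List.zip_cons_cons, List.length_cons, List.range_succ_eq_map,
            List.countP_cons, List.countP_cons, List.countP_map, ih u hlen']
          have hc : (List.range t.length).countP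
              ((fun j => !((a :: t).getD j "" == (b :: u).getD j "")) ∘ Nat.succ)
              = (List.range t.length).countP (fun j => !(t.getD j "" == u.getD j "")) := by
            apply List.countP_congr
            intro x hx
            simp [Function.comp, List.getD_cons_succ]
          rw [hc]
          simp

theorem countP_range_split (L w : Nat) (hw : w ≤ L) (p : Nat → Bool)
    (hp : ∀ j, w ≤ j → j < L → p j = false) :
    (List.range L).countP p = (List.range w).countP p := by
  have hL : L = w + (L - w) := by omega
  rw [hL, List.range_add, List.countP_append]
  have hz : (List.map (fun x => w + x) (List.range (L - w))).countP p = 0 := by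
    rw [List.countP_eq_zero]
    intro a ha
    simp only [List.mem_map, List.mem_range] at ha
    obtain ⟨x, hx, rfl⟩ := ha
    simp [hp (w + x) (by omega) (by omega)]
  omega

theorem row_count_eq (h w i : Nat) (r : List String) (hw : w ≤ r.length)
    (hnd : ¬ (1 < w ∧ w < r.length ∧ r.getLast? = some ">")) :
    ((r.zip (r.mapIdx (fun j c => bcNewCell h w i j (r.length - 1) c))).countP
        (fun p => !(p.1 == p.2)))
      = (List.range w).countP (fun j =>
          !(r.getD j "" == (r.mapIdx (fun j c => bcNewCell h w i j (r.length - 1) c)).getD j "")) := by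
  rw [countP_zip_eq r _ (by simp)]
  apply countP_range_split _ _ hw
  intro j hwj hjl
  have hnd' : ¬ (1 < w ∧ j = r.length - 1 ∧ r.getD j "" = ">") := by
    rintro ⟨hw1, hjlast, hval⟩
    apply hnd
    refine ⟨hw1, by omega, ?_⟩
    rw [List.getLast?_eq_getElem?, ← hjlast, List.getElem?_eq_getElem hjl]
    have hx : r.getD j "" = r[j]'hjl := by
      simp [List.getD_eq_getElem?_getD, List.getElem?_eq_getElem hjl]
    rw [← hx, hval]
  rw [mapIdx_getD _ _ _ hjl, bcNewCell_tail h w i j r hwj hjl hnd']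
  simp

theorem cnt_eq (grid : List (List String)) (hne : grid ≠ [])
    (hrows : ∀ row ∈ grid, (grid.getD 0 []).length ≤ row.length)
    (hD : ¬ (1 < (grid.getD 0 []).length ∧
      ∃ row ∈ grid, (grid.getD 0 []).length < row.length ∧ row.getLast? = some ">")) :
    bcCnt grid = bcAltCnt grid := by
  unfold bcCnt bcAltCnt
  rw [ng2_eq grid hne hrows]
  have hA : ∀ (c : Int), ∀ i ∈ List.range grid.length,
      (List.range (grid.getD 0 []).length).foldl (fun c j =>
        if (grid.getD i []).getD j "" != ((bcAltGrid grid).getD i []).getD j ""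
        then c + 1 else c) c
      = c + (((List.range (grid.getD 0 []).length).countP (fun j =>
          (grid.getD i []).getD j "" != ((bcAltGrid grid).getD i []).getD j "") : Nat) : Int) :=
    fun c i _ => PySem.List.foldl_if_add_one _ _ _
  rw [PySem.List.foldl_congr_mem _ _ _ _ hA, PySem.List.foldl_add]
  have hB : ∀ (c : Int), ∀ rn ∈ grid.zip (bcAltGrid grid),
      (rn.1.zip rn.2).foldl (fun c p => if p.1 ≠ p.2 then c + 1 else c) c
      = c + (((rn.1.zip rn.2).countP (fun p => decide (p.1 ≠ p.2)) : Nat) : Int) :=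
    fun c rn _ => PySem.List.foldl_ite_add_one _ _ _
  rw [PySem.List.foldl_congr_mem _ _ _ _ hB, PySem.List.foldl_add]
  simp only [zero_add]
  congr 1
  apply List.ext_getElem? ; intro i
  rw [List.getElem?_map, List.getElem?_map]
  have hzlen : (grid.zip (bcAltGrid grid)).length = grid.length := by
    simp [bcAltGrid, List.length_zip]
  by_cases hi : i < grid.length
  · have hialt : i < (bcAltGrid grid).length := by simp [bcAltGrid]; omega
    rw [List.getElem?_range hi, List.getElem?_eq_getElem (by omega : i < (grid.zip (bcAltGrid grid)).length)]
    simp only [Option.map_some, List.getElem_zip, Option.some.injEq]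
    have hr : grid[i]'hi ∈ grid := List.getElem_mem _
    have hgi : grid.getD i [] = grid[i]'hi := by
      simp [List.getD_eq_getElem?_getD, List.getElem?_eq_getElem hi]
    have hngi : (bcAltGrid grid)[i]'hialt
        = (grid[i]'hi).mapIdx (fun j c =>
            bcNewCell grid.length (grid.getD 0 []).length i j ((grid[i]'hi).length - 1) c) := by
      simp [bcAltGrid, List.getElem_mapIdx]
    have hngetD : (bcAltGrid grid).getD i []
        = (grid[i]'hi).mapIdx (fun j c =>
            bcNewCell grid.length (grid.getD 0 []).length i j ((grid[i]'hi).length - 1) c) := by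
      rw [List.getD_eq_getElem?_getD, List.getElem?_eq_getElem hialt]
      simpa using hngi
    have hnd_i : ¬ (1 < (grid.getD 0 []).length ∧
        (grid.getD 0 []).length < (grid[i]'hi).length ∧ (grid[i]'hi).getLast? = some ">") := by
      rintro ⟨hw1, hlt, hlast⟩
      exact hD ⟨hw1, grid[i]'hi, hr, hlt, hlast⟩
    have hconv : ((grid[i]'hi).zip ((bcAltGrid grid)[i]'hialt)).countP (fun p => decide (p.1 ≠ p.2))
        = ((grid[i]'hi).zip ((grid[i]'hi).mapIdx (fun j c =>
            bcNewCell grid.length (grid.getD 0 []).length i j ((grid[i]'hi).length - 1) c))).countP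
          (fun p => !(p.1 == p.2)) := by
      rw [hngi]
      apply List.countP_congr
      intro x hx
      simp [beq_iff_eq]
    rw [hconv, row_count_eq grid.length (grid.getD 0 []).length i (grid[i]'hi)
      (hrows _ hr) hnd_i]
    have : ∀ j, ((grid.getD i []).getD j "" != ((bcAltGrid grid).getD i []).getD j "")
        = !((grid[i]'hi).getD j "" == ((grid[i]'hi).mapIdx (fun j c =>
            bcNewCell grid.length (grid.getD 0 []).length i j ((grid[i]'hi).length - 1) c)).getD j "") := by
      intro j
      rw [hgi, hngetD]
      rfl
    have hpp : (List.range (grid.getD 0 []).length).countP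
        (fun j => (grid.getD i []).getD j "" != ((bcAltGrid grid).getD i []).getD j "")
        = (List.range (grid.getD 0 []).length).countP
          (fun j => !((grid[i]'hi).getD j "" == ((grid[i]'hi).mapIdx (fun j c =>
            bcNewCell grid.length (grid.getD 0 []).length i j ((grid[i]'hi).length - 1) c)).getD j "")) := by
      apply List.countP_congr
      intro x hx
      rw [this x]
    rw [hpp]
  · rw [List.getElem?_eq_none_iff.mpr (by simp; omega),
      List.getElem?_eq_none_iff.mpr (by omega : (grid.zip (bcAltGrid grid)).length ≤ i)]
    rfl

theorem bcCnt_sum (grid : List (List String)) (hne : grid ≠ [])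
    (hrows : ∀ row ∈ grid, (grid.getD 0 []).length ≤ row.length) :
    bcCnt grid = ((List.range grid.length).map (fun i =>
      (((List.range (grid.getD 0 []).length).countP (fun j =>
        (grid.getD i []).getD j "" != ((bcAltGrid grid).getD i []).getD j "")) : Int))).sum := by
  unfold bcCnt
  rw [ng2_eq grid hne hrows]
  have hA : ∀ (c : Int), ∀ i ∈ List.range grid.length,
      (List.range (grid.getD 0 []).length).foldl (fun c j =>
        if (grid.getD i []).getD j "" != ((bcAltGrid grid).getD i []).getD j ""
        then c + 1 else c) c
      = c + (((List.range (grid.getD 0 []).length).countP (fun j =>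
          (grid.getD i []).getD j "" != ((bcAltGrid grid).getD i []).getD j "") : Nat) : Int) :=
    fun c i _ => PySem.List.foldl_if_add_one _ _ _
  rw [PySem.List.foldl_congr_mem _ _ _ _ hA, PySem.List.foldl_add, zero_add]

theorem bcAltCnt_sum (grid : List (List String)) :
    bcAltCnt grid = ((List.range grid.length).map (fun i =>
      (((List.range (grid.getD i []).length).countP (fun j =>
        (grid.getD i []).getD j "" != ((bcAltGrid grid).getD i []).getD j "")) : Int))).sum := by
  unfold bcAltCnt
  have hB : ∀ (c : Int), ∀ rn ∈ grid.zip (bcAltGrid grid),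
      (rn.1.zip rn.2).foldl (fun c p => if p.1 ≠ p.2 then c + 1 else c) c
      = c + (((rn.1.zip rn.2).countP (fun p => decide (p.1 ≠ p.2)) : Nat) : Int) :=
    fun c rn _ => PySem.List.foldl_ite_add_one _ _ _
  rw [PySem.List.foldl_congr_mem _ _ _ _ hB, PySem.List.foldl_add, zero_add]
  congr 1
  apply List.ext_getElem? ; intro i
  rw [List.getElem?_map, List.getElem?_map]
  by_cases hi : i < grid.length
  · have hialt : i < (bcAltGrid grid).length := by simp [bcAltGrid]; omega
    rw [List.getElem?_eq_getElem (by simp [bcAltGrid, List.length_zip]; omega :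
      i < (grid.zip (bcAltGrid grid)).length), List.getElem?_range hi]
    simp only [Option.map_some, List.getElem_zip, Option.some.injEq]
    have hgi : grid.getD i [] = grid[i]'hi := by
      simp [List.getD_eq_getElem?_getD, List.getElem?_eq_getElem hi]
    have hngi : (bcAltGrid grid)[i]'hialt
        = (grid[i]'hi).mapIdx (fun j c =>
            bcNewCell grid.length (grid.getD 0 []).length i j ((grid[i]'hi).length - 1) c) := by
      simp [bcAltGrid, List.getElem_mapIdx]
    have hngetD : (bcAltGrid grid).getD i []
        = (grid[i]'hi).mapIdx (fun j c =>
            bcNewCell grid.length (grid.getD 0 []).length i j ((grid[i]'hi).length - 1) c) := by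
      rw [List.getD_eq_getElem?_getD, List.getElem?_eq_getElem hialt]
      simpa using hngi
    have hconv : ((grid[i]'hi).zip ((bcAltGrid grid)[i]'hialt)).countP (fun p => decide (p.1 ≠ p.2))
        = ((grid[i]'hi).zip ((bcAltGrid grid)[i]'hialt)).countP (fun p => !(p.1 == p.2)) := by
      apply List.countP_congr
      intro x hx
      simp
    rw [hconv, hngi, countP_zip_eq _ _ (by simp)]
    have hpp : ∀ j, (!((grid[i]'hi).getD j "" == ((grid[i]'hi).mapIdx (fun j c =>
          bcNewCell grid.length (grid.getD 0 []).length i j ((grid[i]'hi).length - 1) c)).getD j ""))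
        = ((grid.getD i []).getD j "" != ((bcAltGrid grid).getD i []).getD j "") := by
      intro j
      rw [hgi, hngetD]
      rfl
    rw [List.countP_congr (fun x _ => by rw [hpp x]), hgi]
  · rw [List.getElem?_eq_none_iff.mpr (by simp [bcAltGrid, List.length_zip]; omega),
      List.getElem?_eq_none_iff.mpr (by simp; omega)]
    rfl

theorem countP_range_prefix_le (w L : Nat) (hw : w ≤ L) (p : Nat → Bool) :
    (List.range w).countP p ≤ (List.range L).countP p := by
  have hL : L = w + (L - w) := by omega
  rw [hL, List.range_add, List.countP_append]
  omega

theorem cnt_lt (grid : List (List String)) (hne : grid ≠ [])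
    (hrows : ∀ row ∈ grid, (grid.getD 0 []).length ≤ row.length)
    (hD : 1 < (grid.getD 0 []).length ∧
      ∃ row ∈ grid, (grid.getD 0 []).length < row.length ∧ row.getLast? = some ">") :
    bcCnt grid < bcAltCnt grid := by
  rw [bcCnt_sum grid hne hrows, bcAltCnt_sum grid]
  apply List.sum_lt_sum
  · intro i hi
    have hle := countP_range_prefix_le (grid.getD 0 []).length (grid.getD i []).length
      (hrows _ (by
        rw [List.getD_eq_getElem?_getD,
          List.getElem?_eq_getElem (List.mem_range.mp hi)]
        exact List.getElem_mem _))
      (fun j => (grid.getD i []).getD j "" != ((bcAltGrid grid).getD i []).getD j "")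
    exact_mod_cast hle
  · obtain ⟨hw1, row, hmem, hlt, hlast⟩ := hD
    obtain ⟨i0, hi0, heq⟩ := List.getElem_of_mem hmem
    have hgi : grid.getD i0 [] = row := by
      rw [List.getD_eq_getElem?_getD, List.getElem?_eq_getElem hi0]
      simpa using heq
    refine ⟨i0, List.mem_range.mpr hi0, ?_⟩
    have hialt : i0 < (bcAltGrid grid).length := by simp [bcAltGrid]; omega
    have hngetD : (bcAltGrid grid).getD i0 []
        = row.mapIdx (fun j c =>
            bcNewCell grid.length (grid.getD 0 []).length i0 j (row.length - 1) c) := by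
      rw [List.getD_eq_getElem?_getD, List.getElem?_eq_getElem hialt]
      simp [bcAltGrid, List.getElem_mapIdx, heq]
    have hrL : row.getD (row.length - 1) "" = ">" := by
      rw [List.getLast?_eq_getElem?] at hlast
      rw [List.getD_eq_getElem?_getD, hlast]
      rfl
    have hcell : ((bcAltGrid grid).getD i0 []).getD (row.length - 1) "" = "<" := by
      rw [hngetD, mapIdx_getD _ _ _ (by omega), hrL]
      unfold bcNewCell
      rw [if_neg (by rintro ⟨-, hz, -⟩; omega), if_pos ⟨hw1, rfl, rfl⟩]
    have hptrue : ((grid.getD i0 []).getD (row.length - 1) ""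
        != ((bcAltGrid grid).getD i0 []).getD (row.length - 1) "") = true := by
      rw [hgi, hrL, hcell]
      decide
    have hsplit : (grid.getD i0 []).length
        = (grid.getD 0 []).length + ((grid.getD i0 []).length - (grid.getD 0 []).length) := by
      rw [hgi]; omega
    have hstrict : (List.range (grid.getD 0 []).length).countP (fun j =>
          (grid.getD i0 []).getD j "" != ((bcAltGrid grid).getD i0 []).getD j "")
        < (List.range (grid.getD i0 []).length).countP (fun j =>
          (grid.getD i0 []).getD j "" != ((bcAltGrid grid).getD i0 []).getD j "") := by
      rw [hsplit, List.range_add, List.countP_append]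
      have hpos : 0 < (List.map (fun x => (grid.getD 0 []).length + x)
          (List.range ((grid.getD i0 []).length - (grid.getD 0 []).length))).countP (fun j =>
          (grid.getD i0 []).getD j "" != ((bcAltGrid grid).getD i0 []).getD j "") := by
        apply List.countP_pos_iff.mpr
        refine ⟨row.length - 1, ?_, ?_⟩
        · apply List.mem_map.mpr
          refine ⟨row.length - 1 - (grid.getD 0 []).length, List.mem_range.mpr (by rw [hgi]; omega), by omega⟩
        · exact hptrue
      omega
    exact_mod_cast hstrict

-- ===== bridging lemmas: the B port computes (bcNg2, bcC), and bcAltCnt = bcC on Pre_ =====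

theorem altRowStep_eq (w : Nat) (st : List (List String) × Int) (r : List String) :
    altRowStep w st r = (st.1 ++ [if 1 < w then aRow r else r], st.2 + hind w r) := by
  unfold altRowStep aRow hind
  by_cases hw : 1 < w <;>
    simp only [hw, if_true, if_false] <;>
    by_cases h1 : r.getD 0 "" == "<" <;>
    by_cases h2 : r.getD (r.length - 1) "" == ">" <;>
    simp_all [beq_iff_eq] <;> ring

theorem foldl_altRowStep (w : Nat) (rows : List (List String)) (st : List (List String) × Int) :
    rows.foldl (altRowStep w) st
      = (st.1 ++ rows.map (fun r => if 1 < w then aRow r else r),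
         st.2 + (rows.map (hind w)).sum) := by
  induction rows generalizing st with
  | nil => simp
  | cons r t ih =>
      rw [List.foldl_cons, altRowStep_eq, ih]
      simp [List.append_assoc, add_assoc]

theorem altStep2_eq (grid : List (List String)) (st : List (List String) × Int) (j : Nat) :
    altStep2 grid st j = (bcStep2 grid st.1 j, st.2 + vind grid j) := by
  unfold altStep2 bcStep2 vind
  by_cases c1 : (grid.getD 0 []).getD j "" == "^" <;>
    by_cases c2 : (grid.getD (grid.length - 1) []).getD j "" == "v" <;>
    simp_all [beq_iff_eq] <;> ring

theorem foldl_altStep2 (grid : List (List String)) (l : List Nat)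
    (st : List (List String) × Int) :
    l.foldl (altStep2 grid) st
      = (l.foldl (bcStep2 grid) st.1, st.2 + (l.map (vind grid)).sum) := by
  induction l generalizing st with
  | nil => simp
  | cons j t ih =>
      rw [List.foldl_cons, altStep2_eq, ih]
      simp [add_assoc]

theorem bcNg1_map (grid : List (List String)) :
    bcNg1 grid = grid.map (fun r => if 1 < (grid.getD 0 []).length then aRow r else r) := by
  unfold bcNg1
  by_cases hw : 1 < (grid.getD 0 []).length
  · rw [if_pos hw, phase1_foldl grid grid.length le_rfl,
      show (fun r => if 1 < (grid.getD 0 []).length then aRow r else r) = aRow from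
        funext (fun r => if_pos hw)]
    apply List.ext_getElem? ; intro i
    rw [List.getElem?_mapIdx, List.getElem?_map]
    cases hg : grid[i]? with
    | none => rfl
    | some r =>
        have hi : i < grid.length := getElem?_some_lt _ _ _ hg
        simp [hi]
  · rw [if_neg hw,
      show (fun r => if 1 < (grid.getD 0 []).length then aRow r else r) = (fun r => r) from
        funext (fun r => if_neg hw), List.map_id']

theorem alt_eq (grid : List (List String)) :
    boundary_count_alt grid = (bcNg2 grid, bcC grid) := by
  unfold boundary_count_alt bcNg2 bcC
  rw [foldl_altRowStep]
  by_cases hh : 1 < grid.length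
  · rw [if_pos hh, if_pos hh, if_pos hh, foldl_altStep2]
    simp only [List.nil_append]
    rw [← bcNg1_map]
    simp [add_comm]
  · rw [if_neg hh, if_neg hh, if_neg hh]
    simp only [List.nil_append]
    rw [← bcNg1_map]
    simp

-- fired cells: a cell differs from its bcNewCell image exactly when one of the four flip
-- conditions holds
theorem fired_iff (h w i j last : Nat) (c : String) :
    (c != bcNewCell h w i j last c)
      = decide ((1 < w ∧ j = 0 ∧ c = "<") ∨ (1 < w ∧ j = last ∧ c = ">")
          ∨ (1 < h ∧ j < w ∧ i = 0 ∧ c = "^") ∨ (1 < h ∧ j < w ∧ i = h - 1 ∧ c = "v")) := by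
  unfold bcNewCell
  split_ifs with h1 h2 h3 h4
  · rw [decide_eq_true (Or.inl h1), h1.2.2]; decide
  · rw [decide_eq_true (Or.inr (Or.inl h2)), h2.2.2]; decide
  · rw [decide_eq_true (Or.inr (Or.inr (Or.inl h3))), h3.2.2.2]; decide
  · rw [decide_eq_true (Or.inr (Or.inr (Or.inr h4))), h4.2.2.2]; decide
  · have hno : ¬ ((1 < w ∧ j = 0 ∧ c = "<") ∨ (1 < w ∧ j = last ∧ c = ">")
        ∨ (1 < h ∧ j < w ∧ i = 0 ∧ c = "^") ∨ (1 < h ∧ j < w ∧ i = h - 1 ∧ c = "v")) := by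
      rintro (h | h | h | h)
      exacts [h1 h, h2 h, h3 h, h4 h]
    rw [decide_eq_false hno]
    simp

theorem countP_disjoint_or {α : Type} (l : List α) (p q : α → Bool)
    (hdis : ∀ x ∈ l, ¬(p x = true ∧ q x = true)) :
    l.countP (fun x => p x || q x) = l.countP p + l.countP q := by
  induction l with
  | nil => simp
  | cons a t ih =>
      rw [List.countP_cons, List.countP_cons, List.countP_cons,
        ih (fun x hx => hdis x (List.mem_cons_of_mem a hx))]
      by_cases hp : p a <;> by_cases hq : q a
      · exact absurd ⟨hp, hq⟩ (hdis a (List.mem_cons_self))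
      all_goals first
        | (simp [hp, hq]; omega)
        | simp [hp, hq]

theorem countP_range_at (L a : Nat) (P : Nat → Prop) [DecidablePred P] :
    (List.range L).countP (fun j => decide (j = a ∧ P j))
      = if a < L ∧ P a then 1 else 0 := by
  induction L with
  | zero => simp
  | succ L ih =>
      rw [List.range_succ, List.countP_append, ih]
      by_cases ha : a = L
      · subst ha
        by_cases hP : P a <;> simp [hP] <;> omega
      · have : (decide (L = a ∧ P L)) = false := by simp; intro h; exact absurd h (Ne.symm ha)
        simp only [List.countP_cons, List.countP_nil, this]
        by_cases hl : a < L <;> by_cases hP : P a <;> simp [hl, hP] <;> omega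

theorem rowCount (h w i : Nat) (r : List String) (hw : w ≤ r.length) :
    (List.range r.length).countP
        (fun j => r.getD j "" != bcNewCell h w i j (r.length - 1) (r.getD j ""))
      = ((if 1 < w ∧ r.getD 0 "" = "<" then 1 else 0)
        + (if 1 < w ∧ r.getD (r.length - 1) "" = ">" then 1 else 0))
        + ((if 1 < h ∧ i = 0 then
            (List.range w).countP (fun j => decide (r.getD j "" = "^")) else 0)
        + (if 1 < h ∧ i = h - 1 then
            (List.range w).countP (fun j => decide (r.getD j "" = "v")) else 0)) := by
  have hfun : (fun j => r.getD j "" != bcNewCell h w i j (r.length - 1) (r.getD j ""))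
      = (fun j => (decide (j = 0 ∧ (1 < w ∧ r.getD j "" = "<"))
          || decide (j = r.length - 1 ∧ (1 < w ∧ r.getD j "" = ">")))
          || (decide (1 < h ∧ j < w ∧ i = 0 ∧ r.getD j "" = "^")
          || decide (1 < h ∧ j < w ∧ i = h - 1 ∧ r.getD j "" = "v"))) := by
    funext j
    rw [fired_iff]
    simp only [← Bool.decide_or]
    rw [decide_eq_decide]
    tauto
  rw [hfun]
  rw [countP_disjoint_or _ _ _ (by
    rintro x hx ⟨h1, h2⟩
    simp only [Bool.or_eq_true, decide_eq_true_eq] at h1 h2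
    rcases h1 with ⟨-, -, hc⟩ | ⟨-, -, hc⟩ <;>
      rcases h2 with ⟨-, -, -, hc'⟩ | ⟨-, -, -, hc'⟩ <;> rw [hc] at hc' <;> exact absurd hc' (by decide))]
  rw [countP_disjoint_or _ (fun j => decide (j = 0 ∧ (1 < w ∧ r.getD j "" = "<"))) _ (by
    rintro x hx ⟨h1, h2⟩
    simp only [decide_eq_true_eq] at h1 h2
    rw [h1.2.2] at h2; exact absurd h2.2.2 (by decide))]
  rw [countP_disjoint_or _ (fun j => decide (1 < h ∧ j < w ∧ i = 0 ∧ r.getD j "" = "^")) _ (by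
    rintro x hx ⟨h1, h2⟩
    simp only [decide_eq_true_eq] at h1 h2
    rw [h1.2.2.2] at h2; exact absurd h2.2.2.2 (by decide))]
  congr 1
  · congr 1
    · rw [countP_range_at]
      by_cases hw1 : 1 < w
      · have hL : 0 < r.length := by omega
        simp [hw1, hL]
      · simp [hw1]
    · rw [countP_range_at]
      by_cases hw1 : 1 < w
      · have hL : r.length - 1 < r.length := by omega
        simp [hw1, hL]
      · simp [hw1]
  · congr 1
    · by_cases hh : 1 < h ∧ i = 0
      · rw [if_pos hh]
        rw [countP_range_split r.length w hw _ (by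
          intro j hwj hjl; simp; intro _ hjw; omega)]
        apply List.countP_congr
        intro j hj
        have hjw : j < w := List.mem_range.mp hj
        simp [hh.1, hh.2, hjw]
      · rw [if_neg hh, List.countP_eq_zero.mpr]
        intro j hj
        simp only [decide_eq_true_eq]
        rintro ⟨a, -, b, -⟩
        exact hh ⟨a, b⟩
    · by_cases hh : 1 < h ∧ i = h - 1
      · rw [if_pos hh]
        rw [countP_range_split r.length w hw _ (by
          intro j hwj hjl; simp; intro _ hjw; omega)]
        apply List.countP_congr
        intro j hj
        have hjw : j < w := List.mem_range.mp hj
        simp [hh.1, hh.2, hjw]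
      · rw [if_neg hh, List.countP_eq_zero.mpr]
        intro j hj
        simp only [decide_eq_true_eq]
        rintro ⟨a, -, b, -⟩
        exact hh ⟨a, b⟩

theorem sum_map_add (l : List Nat) (f g : Nat → Int) :
    (l.map (fun x => f x + g x)).sum = (l.map f).sum + (l.map g).sum := by
  induction l with
  | nil => simp
  | cons a t ih => simp [ih]; ring

theorem sum_map_ite_one (l : List Nat) (p : Nat → Prop) [DecidablePred p] :
    (l.map (fun x => if p x then (1 : Int) else 0)).sum
      = ((l.countP (fun x => decide (p x)) : Nat) : Int) := by
  induction l with
  | nil => simp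
  | cons a t ih =>
      rw [List.map_cons, List.sum_cons, ih, List.countP_cons]
      by_cases hp : p a <;> simp [hp] <;> ring

theorem map_range_getD {β : Type} [Inhabited β] (grid : List (List String))
    (f : List String → β) :
    (List.range grid.length).map (fun i => f (grid.getD i [])) = grid.map f := by
  apply List.ext_getElem? ; intro i
  rw [List.getElem?_map, List.getElem?_map]
  by_cases hi : i < grid.length
  · rw [List.getElem?_range hi, List.getElem?_eq_getElem hi]
    simp [List.getD_eq_getElem?_getD, List.getElem?_eq_getElem hi]
  · rw [List.getElem?_eq_none_iff.mpr (by simp; omega),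
      List.getElem?_eq_none_iff.mpr (by omega)]
    rfl

theorem sum_indicator_zero (n : Nat) (f : Nat → Int) (P : Prop) [Decidable P] :
    ((List.range (n + 1)).map (fun i => if P ∧ i = 0 then f i else 0)).sum
      = if P then f 0 else 0 := by
  rw [List.range_succ_eq_map, List.map_cons, List.sum_cons, List.map_map]
  have hz : ((List.range n).map ((fun i => if P ∧ i = 0 then f i else 0) ∘ Nat.succ)).sum = 0 := by
    apply List.sum_eq_zero
    intro x hx
    obtain ⟨i, -, rfl⟩ := List.mem_map.mp hx
    simp [Function.comp]
  rw [hz]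
  by_cases hP : P <;> simp [hP]

theorem sum_indicator_last (n : Nat) (f : Nat → Int) (P : Prop) [Decidable P] :
    ((List.range (n + 1)).map (fun i => if P ∧ i = n then f i else 0)).sum
      = if P then f n else 0 := by
  rw [List.range_succ, List.map_append, List.sum_append]
  have hz : ((List.range n).map (fun i => if P ∧ i = n then f i else 0)).sum = 0 := by
    apply List.sum_eq_zero
    intro x hx
    obtain ⟨i, hi, rfl⟩ := List.mem_map.mp hx
    have : i < n := List.mem_range.mp hi
    simp; intro _ h; omega
  rw [hz]
  by_cases hP : P <;> simp [hP]

theorem ind_pair (A X Y : Prop) [Decidable A] [Decidable X] [Decidable Y] :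
    ((if A ∧ X then (1 : Int) else 0) + (if A ∧ Y then (1 : Int) else 0))
      = if A then ((if X then (1 : Int) else 0) + (if Y then (1 : Int) else 0)) else 0 := by
  by_cases hA : A <;> by_cases hX : X <;> by_cases hY : Y <;> simp [hA, hX, hY]

theorem bcC_eq_altCnt (grid : List (List String)) (hne : grid ≠ [])
    (hrows : ∀ row ∈ grid, (grid.getD 0 []).length ≤ row.length) :
    bcAltCnt grid = bcC grid := by
  have h0 : 0 < grid.length := by cases grid with | nil => exact absurd rfl hne | cons a t => simp
  rw [bcAltCnt_sum]
  have hcong : (List.range grid.length).map (fun i =>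
      (((List.range (grid.getD i []).length).countP (fun j =>
        (grid.getD i []).getD j "" != ((bcAltGrid grid).getD i []).getD j "")) : Int))
      = (List.range grid.length).map (fun i =>
          (hind (grid.getD 0 []).length (grid.getD i [])
          + ((if 1 < grid.length ∧ i = 0 then
              (((List.range (grid.getD 0 []).length).countP
                (fun j => decide ((grid.getD i []).getD j "" = "^")) : Nat) : Int) else 0)
            + (if 1 < grid.length ∧ i = grid.length - 1 then
              (((List.range (grid.getD 0 []).length).countP
                (fun j => decide ((grid.getD i []).getD j "" = "v")) : Nat) : Int) else 0)))) := by
    apply List.map_congr_left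
    intro i hi
    have hilt : i < grid.length := List.mem_range.mp hi
    have hgi : grid.getD i [] ∈ grid := by
      rw [List.getD_eq_getElem?_getD, List.getElem?_eq_getElem hilt]
      exact List.getElem_mem _
    have hialt : i < (bcAltGrid grid).length := by simp [bcAltGrid]; omega
    have hngetD : (bcAltGrid grid).getD i []
        = (grid.getD i []).mapIdx (fun j c =>
            bcNewCell grid.length (grid.getD 0 []).length i j ((grid.getD i []).length - 1) c) := by
      rw [List.getD_eq_getElem?_getD, List.getElem?_eq_getElem hialt]
      simp [bcAltGrid, List.getElem_mapIdx, List.getD_eq_getElem?_getD,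
        List.getElem?_eq_getElem hilt]
    have hcnt : (List.range (grid.getD i []).length).countP (fun j =>
        (grid.getD i []).getD j "" != ((bcAltGrid grid).getD i []).getD j "")
        = (List.range (grid.getD i []).length).countP (fun j =>
          (grid.getD i []).getD j "" != bcNewCell grid.length (grid.getD 0 []).length i j
            ((grid.getD i []).length - 1) ((grid.getD i []).getD j "")) := by
      apply List.countP_congr
      intro j hj
      have hjl : j < (grid.getD i []).length := List.mem_range.mp hj
      rw [hngetD, mapIdx_getD _ _ _ hjl]
    rw [hcnt, rowCount grid.length (grid.getD 0 []).length i (grid.getD i []) (hrows _ hgi)]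
    push_cast
    congr 1
    unfold hind
    exact ind_pair _ _ _
  rw [hcong, sum_map_add, sum_map_add]
  unfold bcC
  rw [map_range_getD grid (hind (grid.getD 0 []).length)]
  congr 1
  have hn : grid.length = (grid.length - 1) + 1 := by omega
  have hz : ((List.range grid.length).map (fun i =>
      if 1 < grid.length ∧ i = 0 then
        (((List.range (grid.getD 0 []).length).countP
          (fun j => decide ((grid.getD i []).getD j "" = "^")) : Nat) : Int) else 0)).sum
      = if 1 < grid.length then
          (((List.range (grid.getD 0 []).length).countP
            (fun j => decide ((grid.getD 0 []).getD j "" = "^")) : Nat) : Int) else 0 := by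
    rw [hn, sum_indicator_zero]
  have hl : ((List.range grid.length).map (fun i =>
      if 1 < grid.length ∧ i = grid.length - 1 then
        (((List.range (grid.getD 0 []).length).countP
          (fun j => decide ((grid.getD i []).getD j "" = "v")) : Nat) : Int) else 0)).sum
      = if 1 < grid.length then
          (((List.range (grid.getD 0 []).length).countP
            (fun j => decide ((grid.getD (grid.length - 1) []).getD j "" = "v")) : Nat) : Int)
        else 0 := by
    have := sum_indicator_last (grid.length - 1) (fun i =>
      (((List.range (grid.getD 0 []).length).countP
        (fun j => decide ((grid.getD i []).getD j "" = "v")) : Nat) : Int)) (1 < grid.length)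
    rw [← hn] at this
    rw [this]
  rw [hz, hl]
  unfold vind
  by_cases hh : 1 < grid.length
  · rw [if_pos hh, if_pos hh, if_pos hh, sum_map_add, sum_map_ite_one, sum_map_ite_one]
  · rw [if_neg hh, if_neg hh, if_neg hh]
    simp

-- ===== VERDICT (by name: the statement is the Claim_ definition above) =====
theorem boundary_count_spec : Claim_unchanged_boundary_count := by
  intro grid _ hpre
  unfold Spec_boundary_count
  intro hD
  obtain ⟨hne, hrows⟩ := hpre
  rw [alt_eq]
  unfold boundary_count
  rw [← bcC_eq_altCnt grid hne hrows, cnt_eq grid hne hrows hD, ng2_eq grid hne hrows]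

theorem boundary_count_changed : Claim_changed_boundary_count := by
  unfold Claim_changed_boundary_count; decide

theorem boundary_count_tight : Claim_exact_boundary_count := by
  intro grid _ hpre hD
  obtain ⟨hne, hrows⟩ := hpre
  have hlt := cnt_lt grid hne hrows hD
  rw [alt_eq, ← bcC_eq_altCnt grid hne hrows]
  intro heq
  unfold boundary_count at heq
  have h2 : bcCnt grid = bcAltCnt grid := congrArg Prod.snd heq
  omega
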